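-- pv_equiv track=rewrite | github.com/qilinxo/mlearn | src/learn/bayes/bayesHelper.py | wordsToVectoers
-- ===== SOURCE A (Python) =====
-- def wordsToVectoers(vocabList, wordsList):
--     returnMatrix = []
--     for vec in wordsList:
--         returnVec = [0] * len(vocabList)
--         for word in vec:
--             index = 0
--             for item in vocabList:
--                 if item == word:
--                     returnVec[index] = 1
--                 index += 1
--         returnMatrix.append(returnVec)
--     return returnMatrix
-- ===== SOURCE B (Python) =====
-- def wordsToVectoers(vocabList, wordsList):
--     return [[1 if w in vec else 0 for w in vocabList] for vec in wordsList]
-- ===== Notes on version B (the rewrite author's own statement) =====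
-- stated objective: idiomatic
-- what changed: B inverts the traversal: one comprehension per document testing each vocab word's membership in the document, replacing A's per-word full linear scan of the vocabulary with a manually tracked index scattering 1s into a preallocated zero vector.
import Mathlib
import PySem

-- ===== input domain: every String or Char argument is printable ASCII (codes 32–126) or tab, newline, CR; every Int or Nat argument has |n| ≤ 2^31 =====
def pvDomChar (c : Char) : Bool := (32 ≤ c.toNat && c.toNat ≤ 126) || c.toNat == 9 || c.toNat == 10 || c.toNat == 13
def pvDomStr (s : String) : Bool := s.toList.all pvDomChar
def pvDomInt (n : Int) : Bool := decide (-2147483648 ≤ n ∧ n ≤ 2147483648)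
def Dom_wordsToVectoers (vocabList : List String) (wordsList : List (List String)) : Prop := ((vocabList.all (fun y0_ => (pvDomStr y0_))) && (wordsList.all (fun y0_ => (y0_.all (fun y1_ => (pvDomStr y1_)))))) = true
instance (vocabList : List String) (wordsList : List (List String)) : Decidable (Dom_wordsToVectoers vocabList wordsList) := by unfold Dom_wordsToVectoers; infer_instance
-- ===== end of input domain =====

-- B builds each row by a single membership-testing comprehension over the vocabulary,
-- replacing A's per-word scan of the vocabulary with a manual index (idiomatic, not faster).

-- ===== PORT A =====
-- inner 'for item in vocabList' loop with its index counter: state = (returnVec, index)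
def pvScanVocab (vocabList : List String) (word : String) (st : List Int × Nat) : List Int × Nat :=
  vocabList.foldl
    (fun p item => ((if item == word then p.1.set p.2 1 else p.1), p.2 + 1)) st

def wordsToVectoers (vocabList : List String) (wordsList : List (List String)) : List (List Int) :=
  wordsList.foldl
    (fun returnMatrix vec =>
      returnMatrix ++
        [vec.foldl (fun returnVec word => (pvScanVocab vocabList word (returnVec, 0)).1)
          (List.replicate vocabList.length 0)])
    []

-- ===== PORT B =====
def wordsToVectoers_alt (vocabList : List String) (wordsList : List (List String)) : List (List Int) :=
  wordsList.map (fun vec => vocabList.map (fun w => if vec.contains w then 1 else 0))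

-- ===== PRECONDITION & SPEC =====
def Spec_wordsToVectoers (vocabList : List String) (wordsList : List (List String)) (out : List (List Int)) : Prop := out = wordsToVectoers_alt vocabList wordsList
instance (vocabList : List String) (wordsList : List (List String)) (out : List (List Int)) : Decidable (Spec_wordsToVectoers vocabList wordsList out) := by unfold Spec_wordsToVectoers; infer_instance

-- ===== CLAIM (what is proved, stated in full; the proofs are below) =====
def Claim_equal_wordsToVectoers : Prop := ∀ (vocabList : List String) (wordsList : List (List String)), Dom_wordsToVectoers vocabList wordsList → Spec_wordsToVectoers vocabList wordsList (wordsToVectoers vocabList wordsList)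

-- ===== LEMMAS AND PROOFS =====

theorem pvZipWithMap (word : String) (g : String → Int) :
    ∀ (l : List String),
      List.zipWith (fun item x => if item == word then (1 : Int) else x) l (l.map g)
        = l.map (fun v => if v == word then 1 else g v) := by
  intro l
  induction l with
  | nil => rfl
  | cons v l ih => simp only [List.map_cons, List.zipWith_cons_cons, ih]

-- the vocab scan at state (pre ++ post, pre.length) writes 1 exactly at the matching positions of post
theorem pvScanVocab_split (word : String) :
    ∀ (l : List String) (pre post : List Int), post.length = l.length →
      (pvScanVocab l word (pre ++ post, pre.length)).1
        = pre ++ List.zipWith (fun item x => if item == word then (1 : Int) else x) l post := by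
  intro l
  induction l with
  | nil =>
      intro pre post h
      simp at h
      simp [pvScanVocab, h]
  | cons item l ih =>
      intro pre post h
      cases post with
      | nil => simp at h
      | cons x post =>
        simp at h
        have hset : (pre ++ x :: post).set pre.length (1 : Int) = pre ++ (1 : Int) :: post := by
          rw [List.set_append_right _ _ (le_refl _)]
          simp
        have step :
            ((if item == word then (pre ++ x :: post).set pre.length 1 else pre ++ x :: post),
              pre.length + 1)
            = (pre ++ [if item == word then (1 : Int) else x] ++ post,
              (pre ++ [if item == word then (1 : Int) else x]).length) := by
          by_cases hc : item == word <;> simp [hc, hset]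
        simp only [pvScanVocab, List.foldl_cons] at *
        rw [step]
        rw [ih (pre ++ [if item == word then (1 : Int) else x]) post h]
        simp

theorem pvScan_map (vocabList : List String) (word : String) (g : String → Int) :
    (pvScanVocab vocabList word (vocabList.map g, 0)).1
      = vocabList.map (fun v => if v == word then 1 else g v) := by
  have h := pvScanVocab_split word vocabList [] (vocabList.map g) (by simp)
  simp only [List.nil_append, List.length_nil] at h
  rw [h, pvZipWithMap]

theorem pvFoldWords (vocabList : List String) :
    ∀ (vec : List String) (g : String → Int),
      vec.foldl (fun returnVec word => (pvScanVocab vocabList word (returnVec, 0)).1)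
          (vocabList.map g)
        = vocabList.map (fun v => if vec.contains v then 1 else g v) := by
  intro vec
  induction vec with
  | nil => intro g; simp
  | cons w vec ih =>
      intro g
      simp only [List.foldl_cons, pvScan_map]
      rw [ih]
      apply List.map_congr_left
      intro v _
      by_cases hw : v = w <;> by_cases hv : v ∈ vec <;>
        simp [hw, hv]

theorem pvRow (vocabList vec : List String) :
    vec.foldl (fun returnVec word => (pvScanVocab vocabList word (returnVec, 0)).1)
        (List.replicate vocabList.length 0)
      = vocabList.map (fun w => if vec.contains w then 1 else 0) := by
  have h0 : (List.replicate vocabList.length (0 : Int)) = vocabList.map (fun _ => 0) := by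
    simp
  rw [h0, pvFoldWords]

theorem pvFoldAppend (vocabList : List String) :
    ∀ (wordsList : List (List String)) (acc : List (List Int)),
      wordsList.foldl
        (fun returnMatrix vec =>
          returnMatrix ++
            [vec.foldl (fun returnVec word => (pvScanVocab vocabList word (returnVec, 0)).1)
              (List.replicate vocabList.length 0)])
        acc
      = acc ++ wordsList.map (fun vec => vocabList.map (fun w => if vec.contains w then 1 else 0)) := by
  intro wordsList
  induction wordsList with
  | nil => intro acc; simp
  | cons vec rest ih =>
      intro acc
      simp only [List.foldl_cons, List.map_cons]
      rw [ih, pvRow]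
      simp

-- ===== VERDICT (by name: the statement is the Claim_ definition above) =====
theorem wordsToVectoers_spec : Claim_equal_wordsToVectoers := by
  intro vocabList wordsList _
  unfold Spec_wordsToVectoers wordsToVectoers wordsToVectoers_alt
  rw [pvFoldAppend]
  simp
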